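-- pv_equiv track=rewrite | github.com/JohnStokes228/minimum_prime_hit_set | shared_functions.py | check_if_solved
-- ===== SOURCE A (Python) =====
-- def check_if_solved(
--     remaining,
--     sols,
-- ):
--     """Check if sols is enough to solve MinHitSet alg.
--
--     Parameters
--     ----------
--     remaining : list
--         List of lists of remaining decompositions to check if sols hit.
--     sols : list
--         List of integers that form an at least partial solution to MinHitSet algorithm.
--
--     Returns
--     -------
--     list
--         List of remaining solutions not hit by sols.
--     """
--     check = []
--
--     for decomposition in remaining:
--         check.append(any(item in decomposition for item in sols))
--
--     if all(check):
--         return []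
--
--     else:
--         indices = [i for i, x in enumerate(check) if x is False]
--         remaining = [remaining[i] for i in indices]
--
--         return remaining
-- ===== SOURCE B (Python) =====
-- def check_if_solved(
--     remaining,
--     sols,
-- ):
--     """Return the decompositions in remaining that no element of sols hits."""
--     return [d for d in remaining if not any(item in d for item in sols)]
-- ===== Notes on version B (the rewrite author's own statement) =====
-- stated objective: simpler
-- what changed: Replaced the two-phase structure (materialize a boolean check list, all() early return, collect indices of False entries, reindex remaining) with a single direct filtering pass that keeps each decomposition not hit by any element of sols.
import Mathlib
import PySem

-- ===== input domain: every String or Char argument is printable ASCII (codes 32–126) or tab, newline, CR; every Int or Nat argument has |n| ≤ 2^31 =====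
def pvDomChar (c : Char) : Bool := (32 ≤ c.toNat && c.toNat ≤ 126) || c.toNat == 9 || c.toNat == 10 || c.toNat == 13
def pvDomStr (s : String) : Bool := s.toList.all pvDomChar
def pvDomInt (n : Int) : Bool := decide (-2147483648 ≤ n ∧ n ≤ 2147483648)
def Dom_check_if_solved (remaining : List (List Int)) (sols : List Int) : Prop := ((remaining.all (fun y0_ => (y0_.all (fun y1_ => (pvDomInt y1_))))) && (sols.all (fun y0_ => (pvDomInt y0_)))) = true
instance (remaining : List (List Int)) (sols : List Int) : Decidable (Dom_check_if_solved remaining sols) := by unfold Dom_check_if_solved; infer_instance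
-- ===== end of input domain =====

-- B replaces A's two-phase materialize-check-then-reindex structure with one direct filtering pass (objective: simpler).


-- ===== PORT A =====
-- literal transliteration of A: build the boolean `check` list, `all` early return,
-- collect indices of False entries via enumerate, then reindex `remaining`.
def check_if_solved (remaining : List (List Int)) (sols : List Int) : List (List Int) :=
  let check : List Bool :=
    remaining.foldl (fun acc decomposition => acc ++ [sols.any (fun item => decomposition.contains item)]) []
  if check.all id then
    []
  else
    let indices : List Int :=
      ((PySem.List.enumerate check 0).filter (fun p => p.2 == false)).map (fun p => p.1)
    indices.map (fun i => PySem.List.pyGetD remaining i [])  -- remaining[i]; i always in range here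

-- ===== PORT B =====
def check_if_solved_alt (remaining : List (List Int)) (sols : List Int) : List (List Int) :=
  remaining.filter (fun d => !(sols.any (fun item => d.contains item)))

-- ===== PRECONDITION & SPEC =====
def Spec_check_if_solved (remaining : List (List Int)) (sols : List Int) (out : List (List Int)) : Prop := out = check_if_solved_alt remaining sols
instance (remaining : List (List Int)) (sols : List Int) (out : List (List Int)) : Decidable (Spec_check_if_solved remaining sols out) := by unfold Spec_check_if_solved; infer_instance

-- ===== CLAIM (what is proved, stated in full; the proofs are below) =====
def Claim_equal_check_if_solved : Prop := ∀ (remaining : List (List Int)) (sols : List Int), Dom_check_if_solved remaining sols → Spec_check_if_solved remaining sols (check_if_solved remaining sols)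

-- ===== LEMMAS AND PROOFS =====

-- A's reindexing of the False positions of `check` is exactly a filter,
-- proved with the enumerate start offset generalized over a prefix `pre`.
theorem cis_reindex_eq_filter (p : List Int → Bool) (pre rest : List (List Int)) :
    ((PySem.List.enumerate (rest.map p) (pre.length : Int)).filter (fun q => q.2 == false)).map
        (fun q => PySem.List.pyGetD (pre ++ rest) q.1 []) =
      rest.filter (fun d => !p d) := by
  induction rest generalizing pre with
  | nil => simp
  | cons r rs ih =>
    have h := ih (pre ++ [r])
    simp only [List.append_assoc, List.singleton_append, List.length_append,
      List.length_singleton] at h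
    push_cast at h
    have hget : PySem.List.pyGetD (pre ++ r :: rs) (pre.length : Int) [] = r := by
      rw [PySem.List.pyGetD_natCast]
      simp [List.getD]
    by_cases hp : p r
    · simp only [List.map_cons, PySem.List.enumerate_cons, List.filter_cons, hp]
      simpa using h
    · simp only [Bool.not_eq_true] at hp
      simp only [List.map_cons, PySem.List.enumerate_cons, List.filter_cons, hp]
      simpa [hget] using h

theorem cis_check_eq_map (remaining : List (List Int)) (sols : List Int) :
    remaining.foldl (fun acc decomposition => acc ++ [sols.any (fun item => decomposition.contains item)]) [] =
      remaining.map (fun d => sols.any (fun item => d.contains item)) := by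
  simpa using PySem.List.foldl_append_singleton_eq_map
    (fun d => sols.any (fun item => d.contains item)) remaining []

theorem cis_main (remaining : List (List Int)) (sols : List Int) :
    check_if_solved remaining sols = check_if_solved_alt remaining sols := by
  unfold check_if_solved check_if_solved_alt
  rw [cis_check_eq_map]
  have hf := cis_reindex_eq_filter (fun d => sols.any (fun item => d.contains item)) [] remaining
  simp only [List.length_nil, Nat.cast_zero, List.nil_append] at hf
  by_cases hall : (remaining.map (fun d => sols.any (fun item => d.contains item))).all id
  · simp only [hall, if_true]
    symm
    rw [List.filter_eq_nil_iff]
    intro d hd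
    simp only [List.all_eq_true, List.mem_map, id, forall_exists_index, and_imp] at hall
    have hpd := hall (sols.any (fun item => d.contains item)) d hd rfl
    simp only [List.any_eq_true] at hpd ⊢
    simpa using hpd
  · simp only [hall, List.map_map]
    simpa [Function.comp] using hf

-- ===== VERDICT (by name: the statement is the Claim_ definition above) =====
theorem check_if_solved_spec : Claim_equal_check_if_solved := by
  intro remaining sols _
  exact cis_main remaining sols
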